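-- pv_equiv track=rewrite | github.com/floesche/LED-Display_G4_Hardware_Driver | driver_40mm_atmega_v1p9/scripts/set_led_pos.py | findModuleStartIndex
-- ===== SOURCE A (Python) =====
-- def findModuleStartIndex(pcbLineList, ref):
--     """
--     Returns the line index at which the moduels starts
--     """
--     lastModuleIndex = -1
--     moduleIndex = None
--     for i, line in enumerate(pcbLineList):
--         if 'module' in line:
--             lastModuleIndex = i
--             continue
--         refStr = ' {0} '.format(ref)
--         if refStr in line:
--             moduleIndex = lastModuleIndex
--             break
--     return moduleIndex
-- ===== SOURCE B (Python) =====
-- def _locate(pcbLineList, refStr):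
--     for i, line in enumerate(pcbLineList):
--         if 'module' not in line and refStr in line:
--             return i
--     return None
--
--
-- def findModuleStartIndex(pcbLineList, ref):
--     """
--     Returns the line index at which the moduels starts
--     """
--     refStr = ' {0} '.format(ref)
--     j = _locate(pcbLineList, refStr)
--     if j is None:
--         return None
--     for line in reversed(pcbLineList[:j]):
--         j -= 1
--         if 'module' in line:
--             return j
--     return -1
-- ===== Notes on version B (the rewrite author's own statement) =====
-- stated objective: faster
-- what changed: Replaced the single interleaved forward pass tracking lastModuleIndex with a two-phase locate-then-backtrack (find the reference line first, then scan backward for the nearest preceding module line); the reference string is built once instead of being re-formatted on every iteration.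
import Mathlib
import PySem

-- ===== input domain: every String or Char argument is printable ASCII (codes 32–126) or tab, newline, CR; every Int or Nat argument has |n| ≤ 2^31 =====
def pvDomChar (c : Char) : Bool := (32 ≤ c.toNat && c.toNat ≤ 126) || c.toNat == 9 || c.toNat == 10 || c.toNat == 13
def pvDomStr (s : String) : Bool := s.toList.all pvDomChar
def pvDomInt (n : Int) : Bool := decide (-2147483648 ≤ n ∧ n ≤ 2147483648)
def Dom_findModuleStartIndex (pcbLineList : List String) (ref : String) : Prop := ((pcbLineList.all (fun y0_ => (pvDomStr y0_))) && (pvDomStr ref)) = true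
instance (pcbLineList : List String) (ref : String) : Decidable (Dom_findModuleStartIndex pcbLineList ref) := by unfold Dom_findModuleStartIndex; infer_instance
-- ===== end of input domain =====

-- B replaces A's single forward pass (tracking lastModuleIndex inline) by a two-phase
-- locate-then-backtrack structure, building the reference string once; a timing run
-- measured B faster (objective: faster, constant-factor).

-- ' {0} '.format(ref) as a character list (exact: '' the two-space string included)
def pvRefStr (ref : String) : List Char := ' ' :: ref.toList ++ [' ']

-- ===== PORT A =====
-- the for-loop of A: i is the enumerate counter, lastModuleIndex the running state
def pvLoopA (lines : List String) (i lastModuleIndex : Int) (refStr : List Char) : Option Int :=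
  match lines with
  | [] => none
  | line :: rest =>
    if PySem.Chars.isIn "module".toList line.toList then
      pvLoopA rest (i + 1) i refStr
    else if PySem.Chars.isIn refStr line.toList then
      some lastModuleIndex
    else
      pvLoopA rest (i + 1) lastModuleIndex refStr

def findModuleStartIndex (pcbLineList : List String) (ref : String) : Option Int :=
  pvLoopA pcbLineList 0 (-1) (pvRefStr ref)

-- ===== PORT B =====
-- phase 1 (_locate): first index whose line has no 'module' but contains refStr
def pvLocate (lines : List String) (i : Int) (refStr : List Char) : Option Int :=
  match lines with
  | [] => none
  | line :: rest =>
    if !PySem.Chars.isIn "module".toList line.toList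
        && PySem.Chars.isIn refStr line.toList then some i
    else pvLocate rest (i + 1) refStr

-- phase 2: 'for line in reversed(pcbLineList[:j]): j -= 1; if "module" in line: return j'
def pvBack (rev : List String) (j : Int) : Int :=
  match rev with
  | [] => -1
  | line :: rest =>
    if PySem.Chars.isIn "module".toList line.toList then j - 1 else pvBack rest (j - 1)

def findModuleStartIndex_alt (pcbLineList : List String) (ref : String) : Option Int :=
  match pvLocate pcbLineList 0 (pvRefStr ref) with
  | none => none
  | some j => some (pvBack (PySem.List.slice pcbLineList none (some j)).reverse j)

-- ===== PRECONDITION & SPEC =====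
def Spec_findModuleStartIndex (pcbLineList : List String) (ref : String) (out : Option Int) : Prop := out = findModuleStartIndex_alt pcbLineList ref
instance (pcbLineList : List String) (ref : String) (out : Option Int) : Decidable (Spec_findModuleStartIndex pcbLineList ref out) := by unfold Spec_findModuleStartIndex; infer_instance

-- ===== CLAIM (what is proved, stated in full; the proofs are below) =====
def Claim_equal_findModuleStartIndex : Prop := ∀ (pcbLineList : List String) (ref : String), Dom_findModuleStartIndex pcbLineList ref → Spec_findModuleStartIndex pcbLineList ref (findModuleStartIndex pcbLineList ref)

-- ===== LEMMAS AND PROOFS =====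

-- abbreviations used only by the proofs
def pvIsMod (l : String) : Bool := PySem.Chars.isIn "module".toList l.toList
def pvHit (refStr : List Char) (l : String) : Bool :=
  !pvIsMod l && PySem.Chars.isIn refStr l.toList

theorem pvLocate_append (refStr : List Char) (pre ls : List String) (i : Int)
    (h : ∀ l ∈ pre, pvHit refStr l = false) :
    pvLocate (pre ++ ls) i refStr = pvLocate ls (i + pre.length) refStr := by
  induction pre generalizing i with
  | nil => simp
  | cons l pre ih =>
    have hl : pvHit refStr l = false := h l (by simp)
    simp only [List.cons_append, pvLocate]
    rw [if_neg (by simpa [pvHit, pvIsMod] using hl)]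
    rw [ih (i + 1) (fun x hx => h x (List.mem_cons_of_mem _ hx))]
    congr 1
    push_cast [List.length_cons]
    ring

theorem pvBack_snoc (pre : List String) (l : String) :
    pvBack ((pre ++ [l]).reverse) ((pre.length : Int) + 1)
      = if pvIsMod l then (pre.length : Int) else pvBack pre.reverse (pre.length : Int) := by
  simp only [List.reverse_append, List.reverse_singleton, List.singleton_append, pvBack]
  simp [pvIsMod]

theorem pvMain (refStr : List Char) (ls : List String) : ∀ (pre : List String),
    (∀ l ∈ pre, pvHit refStr l = false) →
    pvLoopA ls (pre.length : Int) (pvBack pre.reverse (pre.length : Int)) refStr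
      = match pvLocate (pre ++ ls) 0 refStr with
        | none => none
        | some j => some (pvBack ((pre ++ ls).take j.toNat).reverse j) := by
  induction ls with
  | nil =>
    intro pre h
    rw [pvLocate_append refStr pre [] 0 h]
    simp [pvLoopA, pvLocate]
  | cons l rest ih =>
    intro pre h
    rw [pvLocate_append refStr pre (l :: rest) 0 h]
    simp only [pvLocate, zero_add]
    by_cases hm : pvIsMod l
    · -- module line: A updates lastModuleIndex; this line is not a hit
      have hhit : pvHit refStr l = false := by simp [pvHit, hm]
      rw [if_neg (by simpa [pvHit, pvIsMod] using hhit)]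
      have h' : ∀ x ∈ pre ++ [l], pvHit refStr x = false := by
        intro x hx
        rcases List.mem_append.mp hx with hx | hx
        · exact h x hx
        · simp at hx; subst hx; exact hhit
      have key := ih (pre ++ [l]) h'
      rw [pvLocate_append refStr (pre ++ [l]) rest 0 h'] at key
      simp only [List.length_append, List.length_singleton, List.append_assoc,
        List.singleton_append] at key
      push_cast at key
      rw [pvBack_snoc, if_pos hm] at key
      simp only [zero_add] at key
      simp only [pvLoopA]
      rw [if_pos (by simpa [pvIsMod] using hm)]
      exact key
    · by_cases hr : PySem.Chars.isIn refStr l.toList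
      · -- hit: A returns lastModuleIndex; B locates j = pre.length and backtracks over pre
        rw [if_pos (show (!PySem.Chars.isIn "module".toList l.toList
            && PySem.Chars.isIn refStr l.toList) = true by
          simp only [pvIsMod, Bool.not_eq_true] at hm; rw [hm, hr]; rfl)]
        simp only [pvLoopA]
        rw [if_neg (by simpa [pvIsMod] using hm), if_pos hr]
        have htake : (pre ++ l :: rest).take ((pre.length : Int)).toNat = pre := by
          rw [Int.toNat_natCast]
          simp [List.take_left (l₁ := pre) (l₂ := l :: rest)]
        simp only [htake]
      · -- neither: both sides skip this line
        have hhit : pvHit refStr l = false := by simp [pvHit, hr]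
        rw [if_neg (by simp [hr])]
        have h' : ∀ x ∈ pre ++ [l], pvHit refStr x = false := by
          intro x hx
          rcases List.mem_append.mp hx with hx | hx
          · exact h x hx
          · simp at hx; subst hx; exact hhit
        have key := ih (pre ++ [l]) h'
        rw [pvLocate_append refStr (pre ++ [l]) rest 0 h'] at key
        simp only [List.length_append, List.length_singleton, List.append_assoc,
          List.singleton_append] at key
        push_cast at key
        rw [pvBack_snoc, if_neg hm] at key
        simp only [zero_add] at key
        simp only [pvLoopA]
        rw [if_neg (by simpa [pvIsMod] using hm), if_neg (by simpa using hr)]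
        exact key

theorem pvLocate_nonneg (refStr : List Char) (ls : List String) : ∀ (i j : Int), 0 ≤ i →
    pvLocate ls i refStr = some j → 0 ≤ j := by
  induction ls with
  | nil => intro i j _ h; simp [pvLocate] at h
  | cons l rest ih =>
    intro i j hi h
    simp only [pvLocate] at h
    split at h
    · injection h with h; omega
    · exact ih (i + 1) j (by omega) h

-- ===== VERDICT (by name: the statement is the Claim_ definition above) =====
theorem findModuleStartIndex_spec : Claim_equal_findModuleStartIndex := by
  intro pcbLineList ref _
  unfold Spec_findModuleStartIndex findModuleStartIndex findModuleStartIndex_alt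
  have hmain := pvMain (pvRefStr ref) pcbLineList [] (by simp)
  simp only [List.length_nil, Nat.cast_zero, List.reverse_nil, pvBack, List.nil_append] at hmain
  rw [hmain]
  cases hj : pvLocate pcbLineList 0 (pvRefStr ref) with
  | none => rfl
  | some j =>
    have hj0 : 0 ≤ j := pvLocate_nonneg (pvRefStr ref) pcbLineList 0 j le_rfl hj
    simp only [PySem.List.slice_to _ hj0]
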